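-- pv_equiv track=rewrite | github.com/Edins0101/backend-visitas | app/domain/ecuador_id.py | _linea_tiene_etiqueta
-- ===== SOURCE A (Python) =====
-- def _linea_tiene_etiqueta(linea: str) -> bool:
--     if not linea:
--         return False
--     tokens = []
--     token = []
--     for ch in linea:
--         if ch.isalnum():
--             token.append(ch)
--         else:
--             if token:
--                 tokens.append("".join(token))
--                 token = []
--     if token:
--         tokens.append("".join(token))
--     etiquetas = {"NUI", "DOCUMENTO", "DOC", "NO", "NRO", "NUM", "NUMERO"}
--     return any(t in etiquetas for t in tokens)
-- ===== SOURCE B (Python) =====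
-- def _linea_tiene_etiqueta(linea: str) -> bool:
--     etiquetas = {"NUI", "DOCUMENTO", "DOC", "NO", "NRO", "NUM", "NUMERO"}
--     cleaned = "".join(c if c.isalnum() else " " for c in linea)
--     return not etiquetas.isdisjoint(cleaned.split())
-- ===== Notes on version B (the rewrite author's own statement) =====
-- stated objective: idiomatic
-- what changed: Replaces the manual token/tokens accumulator loop with a map (non-alphanumeric chars to spaces) followed by str.split() and a set-disjointness test, removing all explicit accumulator bookkeeping.
import Mathlib
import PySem

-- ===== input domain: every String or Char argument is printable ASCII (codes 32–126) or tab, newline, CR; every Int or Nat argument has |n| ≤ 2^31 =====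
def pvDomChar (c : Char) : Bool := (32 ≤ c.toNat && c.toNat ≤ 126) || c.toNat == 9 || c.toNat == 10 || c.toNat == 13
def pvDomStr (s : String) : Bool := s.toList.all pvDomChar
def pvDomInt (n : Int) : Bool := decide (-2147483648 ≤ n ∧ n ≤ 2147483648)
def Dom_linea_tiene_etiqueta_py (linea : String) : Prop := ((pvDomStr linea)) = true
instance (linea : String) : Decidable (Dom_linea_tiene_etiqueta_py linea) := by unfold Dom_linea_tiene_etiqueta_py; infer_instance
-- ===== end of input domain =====

-- B replaces A's manual token-accumulator loop by mapping non-alphanumeric chars to spaces,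
-- splitting on whitespace, and testing set disjointness (idiomatic; same O(n) cost).

-- ===== PORT A =====
-- tokens are kept as List Char (Python builds each token as a list of chars and joins it)
def pvEtiquetas : PySem.Set (List Char) :=
  PySem.Set.ofList [['N','U','I'], ['D','O','C','U','M','E','N','T','O'], ['D','O','C'],
                    ['N','O'], ['N','R','O'], ['N','U','M'], ['N','U','M','E','R','O']]

def pvStepA (st : List (List Char) × List Char) (ch : Char) : List (List Char) × List Char :=
  if PySem.Chars.isalnum ch then (st.1, st.2 ++ [ch])
  else if st.2 ≠ [] then (st.1 ++ [st.2], []) else st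

def linea_tiene_etiqueta_py (linea : String) : Bool :=
  if linea == "" then false
  else
    let st := linea.toList.foldl pvStepA ([], [])
    let tokens := if st.2 ≠ [] then st.1 ++ [st.2] else st.1
    tokens.any (fun t => PySem.Set.contains pvEtiquetas t)

-- ===== PORT B =====
-- B's set literal, tokens as lists of chars (same representation choice as port A)
def pvEtiquetasB : PySem.Set (List Char) :=
  PySem.Set.ofList ["NUI".toList, "DOCUMENTO".toList, "DOC".toList,
                    "NO".toList, "NRO".toList, "NUM".toList, "NUMERO".toList]

def linea_tiene_etiqueta_py_alt (linea : String) : Bool :=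
  let cleaned := linea.toList.map (fun c => if PySem.Chars.isalnum c then c else ' ')
  ! PySem.Set.isdisjoint pvEtiquetasB (PySem.Set.ofList (PySem.Chars.split₀ cleaned))

-- ===== PRECONDITION & SPEC =====
def Spec_linea_tiene_etiqueta_py (linea : String) (out : Bool) : Prop := out = linea_tiene_etiqueta_py_alt linea
instance (linea : String) (out : Bool) : Decidable (Spec_linea_tiene_etiqueta_py linea out) := by unfold Spec_linea_tiene_etiqueta_py; infer_instance

-- ===== CLAIM (what is proved, stated in full; the proofs are below) =====
def Claim_equal_linea_tiene_etiqueta_py : Prop := ∀ (linea : String), Dom_linea_tiene_etiqueta_py linea → Spec_linea_tiene_etiqueta_py linea (linea_tiene_etiqueta_py linea)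

-- ===== LEMMAS AND PROOFS =====

theorem pv_isspace_of_isalnum (c : Char) (h : PySem.Chars.isalnum c = true) :
    PySem.Chars.isspace c = false := by
  have hA : ('A').val.toNat = 65 := rfl
  have hZ : ('Z').val.toNat = 90 := rfl
  have ha : ('a').val.toNat = 97 := rfl
  have hz : ('z').val.toNat = 122 := rfl
  have h0 : ('0').val.toNat = 48 := rfl
  have h9 : ('9').val.toNat = 57 := rfl
  have htn : c.toNat = c.val.toNat := rfl
  simp only [PySem.Chars.isalnum, PySem.Chars.isalpha, PySem.Chars.isdigit,
    PySem.Chars.isupper, PySem.Chars.islower, PySem.Chars.isspace,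
    Char.le_def, UInt32.le_iff_toNat_le, Bool.or_eq_true, Bool.and_eq_true, decide_eq_true_eq,
    Bool.or_eq_false_iff, Bool.and_eq_false_iff, decide_eq_false_iff_not] at h ⊢
  omega

theorem pv_go_spec (cs : List Char) : ∀ (tokens : List (List Char)) (token : List Char),
    PySem.Chars.split₀.go (cs.map (fun c => if PySem.Chars.isalnum c then c else ' '))
        token.reverse tokens.reverse
      = (let st := cs.foldl pvStepA (tokens, token);
         if st.2 ≠ [] then st.1 ++ [st.2] else st.1) := by
  induction cs with
  | nil =>
    intro tokens token
    simp only [List.map_nil, List.foldl_nil, PySem.Chars.split₀.go]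
    by_cases h : token = []
    · subst h; simp
    · simp [h, List.isEmpty_iff]
  | cons c cs ih =>
    intro tokens token
    by_cases hc : PySem.Chars.isalnum c = true
    · have hs := pv_isspace_of_isalnum c hc
      simp only [List.map_cons, hc, if_pos, List.foldl_cons]
      rw [PySem.Chars.split₀.go]
      simp only [hs, Bool.false_eq_true, if_false]
      have h2 := ih tokens (token ++ [c])
      simp only [List.reverse_append, List.reverse_cons, List.reverse_nil, List.nil_append,
        List.singleton_append] at h2
      rw [h2]
      simp [pvStepA, hc]
    · have hc' : PySem.Chars.isalnum c = false := by simpa using hc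
      simp only [List.map_cons, hc', Bool.false_eq_true, if_false, List.foldl_cons]
      rw [PySem.Chars.split₀.go]
      simp only [show PySem.Chars.isspace ' ' = true from rfl, if_pos]
      by_cases ht : token = []
      · subst ht
        simp only [List.reverse_nil, List.isEmpty_nil, if_pos]
        have h2 := ih tokens []
        simp only [List.reverse_nil] at h2
        rw [h2]
        simp [pvStepA, hc']
      · have hemp : token.reverse.isEmpty = false := by
          simp [ht]
        simp only [hemp, Bool.false_eq_true, if_false, List.reverse_reverse]
        have h2 := ih (tokens ++ [token]) []
        simp only [List.reverse_nil, List.reverse_append, List.reverse_cons,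
          List.nil_append, List.singleton_append] at h2
        rw [h2]
        simp [pvStepA, hc', ht]

theorem pv_any_eq_not_disjoint (toks : List (List Char)) :
    toks.any (fun t => PySem.Set.contains pvEtiquetas t)
      = ! PySem.Set.isdisjoint pvEtiquetas (PySem.Set.ofList toks) := by
  cases h : PySem.Set.isdisjoint pvEtiquetas (PySem.Set.ofList toks) with
  | true =>
    rw [PySem.Set.isdisjoint_iff] at h
    simp only [Bool.not_true, List.any_eq_false]
    intro t ht
    simp only [PySem.Set.contains_iff]
    intro hmem
    exact h t hmem (by rw [PySem.Set.mem_ofList]; exact ht)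
  | false =>
    have h' : ¬ (∀ x ∈ pvEtiquetas, x ∉ PySem.Set.ofList toks) := by
      rw [← PySem.Set.isdisjoint_iff]; simp [h]
    push Not at h'
    obtain ⟨x, hxe, hxt⟩ := h'
    simp only [Bool.not_false, List.any_eq_true]
    exact ⟨x, by rw [← PySem.Set.mem_ofList]; simpa using hxt,
           (PySem.Set.contains_iff _ _).mpr hxe⟩

-- ===== VERDICT (by name: the statement is the Claim_ definition above) =====
theorem linea_tiene_etiqueta_py_spec : Claim_equal_linea_tiene_etiqueta_py := by
  intro linea _
  unfold Spec_linea_tiene_etiqueta_py linea_tiene_etiqueta_py linea_tiene_etiqueta_py_alt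
  by_cases h0 : linea = ""
  · subst h0
    decide
  · have hne : (linea == "") = false := by simpa using h0
    simp only [hne, Bool.false_eq_true, if_false]
    rw [show PySem.Chars.split₀
          (linea.toList.map (fun c => if PySem.Chars.isalnum c then c else ' '))
        = PySem.Chars.split₀.go
            (linea.toList.map (fun c => if PySem.Chars.isalnum c then c else ' '))
            ([] : List Char).reverse ([] : List (List Char)).reverse from rfl]
    rw [pv_go_spec linea.toList [] []]
    exact pv_any_eq_not_disjoint _
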